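-- pv_equiv track=rewrite | github.com/ahnbu/scrap_sns | migrate_threads_domain.py | migrate_url_key_dict
-- ===== SOURCE A (Python) =====
-- def normalize_threads_url(value: str) -> str:
--     if not isinstance(value, str):
--         return value
--     return (
--         value.replace("https://www.threads.net/", "https://www.threads.com/")
--         .replace("http://www.threads.net/", "https://www.threads.com/")
--         .replace("https://threads.net/", "https://www.threads.com/")
--         .replace("http://threads.net/", "https://www.threads.com/")
--         .replace("https://threads.com/", "https://www.threads.com/")
--         .replace("http://threads.com/", "https://www.threads.com/")
--     )
--
-- def extract_code_from_key(key: str) -> str: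
--     if not isinstance(key, str) or not key:
--         return ""
--     for marker in ("/post/", "/t/"):
--         if marker in key:
--             return key.split(marker, 1)[1].split("/", 1)[0]
--     if "://" not in key:
--         return key
--     return ""
--
-- def canonicalize_legacy_key(key: str, canonical_by_code: dict[str, str]) -> str:
--     if not isinstance(key, str) or not key:
--         return key
--
--     normalized = normalize_threads_url(key)
--     code = extract_code_from_key(key)
--     if code and code in canonical_by_code:
--         return canonical_by_code[code]
--     return normalized
--
-- def migrate_url_key_dict(data: dict[str, list[str]], canonical_by_code: dict[str, str]) -> dict[str, list[str]]:
--     migrated: dict[str, list[str]] = {}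
--     for key, value in data.items():
--         if key == "undefined":
--             continue
--
--         target = canonicalize_legacy_key(key, canonical_by_code)
--         if target not in migrated:
--             migrated[target] = []
--             for tag in data.get(target, []):
--                 if tag and str(tag).strip() and tag not in migrated[target]:
--                     migrated[target].append(tag)
--
--         existing = migrated.get(target, [])
--         merged = []
--         seen = set()
--         for tag in [*existing, *(value or [])]:
--             if not tag or not str(tag).strip():
--                 continue
--             if tag in seen:
--                 continue
--             merged.append(tag)
--             seen.add(tag)
--         migrated[target] = merged
--
--     return migrated
-- ===== SOURCE B (Python) =====
-- def normalize_threads_url(value: str) -> str: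
--     if not isinstance(value, str):
--         return value
--     return (
--         value.replace("https://www.threads.net/", "https://www.threads.com/")
--         .replace("http://www.threads.net/", "https://www.threads.com/")
--         .replace("https://threads.net/", "https://www.threads.com/")
--         .replace("http://threads.net/", "https://www.threads.com/")
--         .replace("https://threads.com/", "https://www.threads.com/")
--         .replace("http://threads.com/", "https://www.threads.com/")
--     )
--
-- def extract_code_from_key(key: str) -> str:
--     if not isinstance(key, str) or not key:
--         return ""
--     for marker in ("/post/", "/t/"):
--         if marker in key:
--             return key.split(marker, 1)[1].split("/", 1)[0]
--     if "://" not in key: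
--         return key
--     return ""
--
-- def canonicalize_legacy_key(key: str, canonical_by_code: dict) -> str:
--     if not isinstance(key, str) or not key:
--         return key
--     normalized = normalize_threads_url(key)
--     code = extract_code_from_key(key)
--     if code and code in canonical_by_code:
--         return canonical_by_code[code]
--     return normalized
--
-- def migrate_url_key_dict(data: dict, canonical_by_code: dict) -> dict:
--     # Pass 1: group all incoming tag lists under their canonical target key,
--     # in first-encounter order.
--     groups: dict = {}
--     for key, value in data.items():
--         if key == "undefined":
--             continue
--         target = canonicalize_legacy_key(key, canonical_by_code)
--         groups.setdefault(target, []).extend(value or [])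
--     # Pass 2: for each target, one filtered dedup over the target's own
--     # pre-existing tags followed by everything grouped under it.
--     migrated: dict = {}
--     for target, tags in groups.items():
--         merged, seen = [], set()
--         for tag in data.get(target, []) + tags:
--             if tag and str(tag).strip() and tag not in seen:
--                 merged.append(tag)
--                 seen.add(tag)
--         migrated[target] = merged
--     return migrated
-- ===== Notes on version B (the rewrite author's own statement) =====
-- stated objective: faster
-- what changed: Replaces A's incremental accumulate-and-re-dedup loop (which re-filters and re-dedups the growing merged list once per key hitting the same target) with a two-pass group-then-construct decomposition: pass 1 groups all tag lists under their canonical target key, pass 2 does a single filtered dedup per target over data.get(target,[]) plus the grouped tags.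
import Mathlib
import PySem

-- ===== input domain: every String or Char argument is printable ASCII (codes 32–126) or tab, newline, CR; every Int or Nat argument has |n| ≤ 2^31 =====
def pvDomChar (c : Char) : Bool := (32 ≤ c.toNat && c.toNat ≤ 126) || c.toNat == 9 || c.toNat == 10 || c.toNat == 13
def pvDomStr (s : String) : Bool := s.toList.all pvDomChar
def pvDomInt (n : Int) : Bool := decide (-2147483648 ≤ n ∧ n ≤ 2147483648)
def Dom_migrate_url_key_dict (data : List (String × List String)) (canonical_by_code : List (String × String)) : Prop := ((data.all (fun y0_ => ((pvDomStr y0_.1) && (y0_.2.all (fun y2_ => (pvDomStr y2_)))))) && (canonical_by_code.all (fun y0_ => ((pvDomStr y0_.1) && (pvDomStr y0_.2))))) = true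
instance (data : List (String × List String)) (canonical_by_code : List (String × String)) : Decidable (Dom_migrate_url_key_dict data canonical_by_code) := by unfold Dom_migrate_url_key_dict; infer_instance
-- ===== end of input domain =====

-- B replaces A's incremental accumulate-and-re-dedup loop by a group-then-construct
-- two-pass decomposition (objective: faster by a single dedup pass per target; same return value).

-- shared module helpers (identical source lines in Source A and Source B)
def pvNormalize (value : String) : String :=
  PySem.Str.replace (PySem.Str.replace (PySem.Str.replace (PySem.Str.replace (PySem.Str.replace (PySem.Str.replace value
    "https://www.threads.net/" "https://www.threads.com/")
    "http://www.threads.net/" "https://www.threads.com/")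
    "https://threads.net/" "https://www.threads.com/")
    "http://threads.net/" "https://www.threads.com/")
    "https://threads.com/" "https://www.threads.com/")
    "http://threads.com/" "https://www.threads.com/"

-- key.split(marker, 1)[1].split("/", 1)[0]; only reached when 'marker in key',
-- so the [1] index always exists and the getD defaults are never taken
def pvAfterMarker (key marker : String) : String :=
  let rest := ((PySem.Str.splitMax? key marker 1).getD []).getD 1 ""
  ((PySem.Str.splitMax? rest "/" 1).getD []).getD 0 ""

def pvExtractCode (key : String) : String :=
  if key = "" then ""
  else if PySem.Str.isIn "/post/" key then pvAfterMarker key "/post/"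
  else if PySem.Str.isIn "/t/" key then pvAfterMarker key "/t/"
  else if !(PySem.Str.isIn "://" key) then key
  else ""

def pvCanonKey (key : String) (cv : PySem.Dict String String) : String :=
  if key = "" then key
  else
    let normalized := pvNormalize key
    let code := pvExtractCode key
    -- canonical_by_code[code] is guarded by 'code in canonical_by_code', so getD is exact
    if (code != "") && cv.contains code then cv.getD code "" else normalized

-- 'tag and str(tag).strip()' for a str tag
def pvKeep (tag : String) : Bool := (tag != "") && (PySem.Str.strip tag != "")

-- ===== PORT A =====
def migrate_url_key_dict (data : List (String × List String)) (canonical_by_code : List (String × String)) : List (String × List String) :=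
  let dataD : PySem.Dict String (List String) := PySem.Dict.mk data
  let cvD : PySem.Dict String String := PySem.Dict.mk canonical_by_code
  let migrated := data.foldl (fun (m : PySem.Dict String (List String)) kv =>
    if kv.1 = "undefined" then m
    else
      let target := pvCanonKey kv.1 cvD
      let m :=
        if !(m.contains target) then
          -- migrated[target] = [] then the append loop over data.get(target, [])
          m.insert target ((dataD.getD target []).foldl
            (fun (acc : List String) tag =>
              if pvKeep tag && !(acc.contains tag) then acc ++ [tag] else acc) [])
        else m
      let existing := m.getD target []
      -- merged/seen loop over [*existing, *(value or [])]  (value is a list, so 'value or []' is value)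
      let ms := (existing ++ kv.2).foldl
        (fun (p : List String × PySem.Set String) tag =>
          if !(pvKeep tag) then p
          else if PySem.Set.contains p.2 tag then p
          else (p.1 ++ [tag], PySem.Set.add p.2 tag)) ([], PySem.Set.empty)
      m.insert target ms.1) PySem.Dict.empty
  migrated.items

-- ===== PORT B =====
def migrate_url_key_dict_alt (data : List (String × List String)) (canonical_by_code : List (String × String)) : List (String × List String) :=
  let dataD : PySem.Dict String (List String) := PySem.Dict.mk data
  let cvD : PySem.Dict String String := PySem.Dict.mk canonical_by_code
  -- pass 1: groups.setdefault(target, []).extend(value or [])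
  let groups := data.foldl (fun (g : PySem.Dict String (List String)) kv =>
    if kv.1 = "undefined" then g
    else
      let target := pvCanonKey kv.1 cvD
      g.insert target (g.getD target [] ++ kv.2)) PySem.Dict.empty
  -- pass 2: one filtered dedup per target
  let migrated := groups.items.foldl (fun (m : PySem.Dict String (List String)) p =>
    let ms := (dataD.getD p.1 [] ++ p.2).foldl
      (fun (q : List String × PySem.Set String) tag =>
        if pvKeep tag && !(PySem.Set.contains q.2 tag) then (q.1 ++ [tag], PySem.Set.add q.2 tag) else q)
      ([], PySem.Set.empty)
    m.insert p.1 ms.1) PySem.Dict.empty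
  migrated.items

-- ===== PRECONDITION & SPEC =====
def Spec_migrate_url_key_dict (data : List (String × List String)) (canonical_by_code : List (String × String)) (out : List (String × List String)) : Prop := out = migrate_url_key_dict_alt data canonical_by_code
instance (data : List (String × List String)) (canonical_by_code : List (String × String)) (out : List (String × List String)) : Decidable (Spec_migrate_url_key_dict data canonical_by_code out) := by unfold Spec_migrate_url_key_dict; infer_instance

-- ===== CLAIM (what is proved, stated in full; the proofs are below) =====
def Claim_equal_migrate_url_key_dict : Prop := ∀ (data : List (String × List String)) (canonical_by_code : List (String × String)), Dom_migrate_url_key_dict data canonical_by_code → Spec_migrate_url_key_dict data canonical_by_code (migrate_url_key_dict data canonical_by_code)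

-- ===== LEMMAS AND PROOFS =====

-- filtered first-occurrence dedup: the value both merge loops compute
def pvDF (xs : List String) : List String := PySem.Set.ofList (xs.filter pvKeep)

-- the per-target value both programs end with; dataD is the original dict
def pvF (dataD : PySem.Dict String (List String)) (p : String × List String) : String × List String :=
  (p.1, pvDF (dataD.getD p.1 [] ++ p.2))

theorem pvMergeA (xs : List String) (s : PySem.Set String) :
    xs.foldl (fun (p : List String × PySem.Set String) tag =>
        if !(pvKeep tag) then p
        else if PySem.Set.contains p.2 tag then p
        else (p.1 ++ [tag], PySem.Set.add p.2 tag)) (s, s)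
      = (PySem.Set.update s (xs.filter pvKeep), PySem.Set.update s (xs.filter pvKeep)) := by
  induction xs generalizing s with
  | nil => simp [PySem.Set.update]
  | cons x xs ih =>
    by_cases hk : pvKeep x
    · by_cases hm : x ∈ s
      · simpa [List.filter_cons, hk, hm, PySem.Set.update_cons,
          PySem.Set.add_of_mem hm] using ih s
      · simpa [List.filter_cons, hk, hm, PySem.Set.update_cons,
          PySem.Set.add_of_not_mem hm] using ih (s ++ [x])
    · simpa [List.filter_cons, hk] using ih s

theorem pvMergeB (xs : List String) (s : PySem.Set String) :
    xs.foldl (fun (q : List String × PySem.Set String) tag =>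
        if pvKeep tag && !(PySem.Set.contains q.2 tag) then (q.1 ++ [tag], PySem.Set.add q.2 tag) else q) (s, s)
      = (PySem.Set.update s (xs.filter pvKeep), PySem.Set.update s (xs.filter pvKeep)) := by
  induction xs generalizing s with
  | nil => simp [PySem.Set.update]
  | cons x xs ih =>
    by_cases hk : pvKeep x
    · by_cases hm : x ∈ s
      · simpa [List.filter_cons, hk, hm, PySem.Set.update_cons,
          PySem.Set.add_of_mem hm] using ih s
      · simpa [List.filter_cons, hk, hm, PySem.Set.update_cons,
          PySem.Set.add_of_not_mem hm] using ih (s ++ [x])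
    · simpa [List.filter_cons, hk] using ih s

theorem pvInitLoop (l : List String) (s : List String) :
    l.foldl (fun (acc : List String) tag =>
        if pvKeep tag && !(acc.contains tag) then acc ++ [tag] else acc) s
      = PySem.Set.update s (l.filter pvKeep) := by
  induction l generalizing s with
  | nil => simp [PySem.Set.update]
  | cons x l ih =>
    by_cases hk : pvKeep x
    · by_cases hm : x ∈ s
      · simpa [List.filter_cons, hk, hm, PySem.Set.update_cons, PySem.Set.add_of_mem hm] using ih s
      · simpa [List.filter_cons, hk, hm, PySem.Set.update_cons, PySem.Set.add_of_not_mem hm]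
          using ih (s ++ [x])
    · simpa [List.filter_cons, hk] using ih s

theorem pvDF_keep (x : List String) : (pvDF x).filter pvKeep = pvDF x := by
  apply List.filter_eq_self.mpr
  intro a ha
  have hm : a ∈ x.filter pvKeep := by simpa [pvDF, PySem.Set.mem_ofList] using ha
  exact List.of_mem_filter hm

theorem pvDF_idem (x y : List String) : pvDF (pvDF x ++ y) = pvDF (x ++ y) := by
  have h := pvDF_keep x
  unfold pvDF at h ⊢
  rw [List.filter_append, h, List.filter_append, PySem.Set.ofList_append,
    PySem.Set.ofList_append, PySem.Set.ofList_ofList]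

-- A's loop body and B's pass-1 body, named for the proofs (definitionally the ports' lambdas)
def pvStepA (dataD : PySem.Dict String (List String)) (cvD : PySem.Dict String String)
    (m : PySem.Dict String (List String)) (kv : String × List String) : PySem.Dict String (List String) :=
  if kv.1 = "undefined" then m
  else
    let target := pvCanonKey kv.1 cvD
    let m :=
      if !(m.contains target) then
        m.insert target ((dataD.getD target []).foldl
          (fun (acc : List String) tag =>
            if pvKeep tag && !(acc.contains tag) then acc ++ [tag] else acc) [])
      else m
    let existing := m.getD target []
    let ms := (existing ++ kv.2).foldl
      (fun (p : List String × PySem.Set String) tag =>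
        if !(pvKeep tag) then p
        else if PySem.Set.contains p.2 tag then p
        else (p.1 ++ [tag], PySem.Set.add p.2 tag)) ([], PySem.Set.empty)
    m.insert target ms.1

def pvStepB (cvD : PySem.Dict String String)
    (g : PySem.Dict String (List String)) (kv : String × List String) : PySem.Dict String (List String) :=
  if kv.1 = "undefined" then g
  else
    let target := pvCanonKey kv.1 cvD
    g.insert target (g.getD target [] ++ kv.2)

theorem pvNodupB (cvD : PySem.Dict String String) (l : List (String × List String))
    (g : PySem.Dict String (List String)) (hnd : g.keys.Nodup) :
    (l.foldl (pvStepB cvD) g).keys.Nodup := by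
  induction l generalizing g with
  | nil => simpa using hnd
  | cons kv l ih =>
    rw [List.foldl_cons]
    apply ih
    unfold pvStepB
    by_cases hu : kv.1 = "undefined"
    · simpa [hu] using hnd
    · simpa [hu] using PySem.Dict.nodup_keys_insert _ _ _ hnd

theorem pvInv (dataD : PySem.Dict String (List String)) (cvD : PySem.Dict String String)
    (l : List (String × List String)) :
    ∀ (g mA : PySem.Dict String (List String)), g.keys.Nodup →
      mA.items = g.items.map (pvF dataD) →
      (l.foldl (pvStepA dataD cvD) mA).items = (l.foldl (pvStepB cvD) g).items.map (pvF dataD) := by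
  induction l with
  | nil => intro g mA hnd h; simpa using h
  | cons kv l ih =>
    intro g mA hnd h
    rw [List.foldl_cons, List.foldl_cons]
    by_cases hu : kv.1 = "undefined"
    · rw [show pvStepA dataD cvD mA kv = mA by unfold pvStepA; rw [if_pos hu],
        show pvStepB cvD g kv = g by unfold pvStepB; rw [if_pos hu]]
      exact ih g mA hnd h
    · have hkeys : mA.keys = g.keys := by
        have hfst : (Prod.fst ∘ pvF dataD) = Prod.fst := funext fun p => rfl
        show mA.items.map Prod.fst = g.items.map Prod.fst
        rw [h, List.map_map, hfst]
      have hcont : mA.contains (pvCanonKey kv.1 cvD) = g.contains (pvCanonKey kv.1 cvD) := by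
        rw [PySem.Dict.contains_eq_decide_mem_keys, PySem.Dict.contains_eq_decide_mem_keys, hkeys]
      by_cases hc : g.contains (pvCanonKey kv.1 cvD) = true
      · -- target already present in both dicts
        have hcA : mA.contains (pvCanonKey kv.1 cvD) = true := hcont.trans hc
        have hs : (g.get? (pvCanonKey kv.1 cvD)).isSome := by
          rw [← PySem.Dict.contains_eq_isSome_get?]; exact hc
        obtain ⟨w, hw⟩ := Option.isSome_iff_exists.mp hs
        have hgd : g.getD (pvCanonKey kv.1 cvD) [] = w := PySem.Dict.getD_of_get?_eq_some g [] hw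
        have hmemg : (pvCanonKey kv.1 cvD, w) ∈ g.items := PySem.Dict.mem_items_of_get?_eq_some g hw
        have hmemA : (pvCanonKey kv.1 cvD,
            pvDF (dataD.getD (pvCanonKey kv.1 cvD) [] ++ w)) ∈ mA.items := by
          rw [h]; exact List.mem_map_of_mem hmemg
        have hndA : mA.keys.Nodup := by rw [hkeys]; exact hnd
        have hgetA : mA.getD (pvCanonKey kv.1 cvD) [] =
            pvDF (dataD.getD (pvCanonKey kv.1 cvD) [] ++ w) :=
          PySem.Dict.getD_of_mem_items mA hmemA hndA []
        have hstepA : pvStepA dataD cvD mA kv = mA.insert (pvCanonKey kv.1 cvD)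
            (pvDF (dataD.getD (pvCanonKey kv.1 cvD) [] ++ (w ++ kv.2))) := by
          unfold pvStepA
          rw [if_neg hu]
          simp only [hcA, Bool.not_true, Bool.false_eq_true, if_false, hgetA, PySem.Set.empty]
          rw [pvMergeA]
          show mA.insert _ (pvDF (pvDF (dataD.getD (pvCanonKey kv.1 cvD) [] ++ w) ++ kv.2)) = _
          rw [pvDF_idem, List.append_assoc]
        have hstepB : pvStepB cvD g kv = g.insert (pvCanonKey kv.1 cvD) (w ++ kv.2) := by
          unfold pvStepB
          rw [if_neg hu]
          show g.insert (pvCanonKey kv.1 cvD) (g.getD (pvCanonKey kv.1 cvD) [] ++ kv.2) = _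
          rw [hgd]
        rw [hstepA, hstepB]
        apply ih
        · exact PySem.Dict.nodup_keys_insert _ _ _ hnd
        · rw [PySem.Dict.items_insert_of_contains mA _ hcA,
            PySem.Dict.items_insert_of_contains g _ hc, h, List.map_map, List.map_map]
          apply List.map_congr_left
          intro p hp
          by_cases hpt : (p.1 == pvCanonKey kv.1 cvD) = true
          · have hpt' : p.1 = pvCanonKey kv.1 cvD := eq_of_beq hpt
            have hget : g.get? p.1 = some p.2 := PySem.Dict.get?_of_mem_items g hp hnd
            have hp2 : p.2 = w := by
              rw [hpt'] at hget; rw [hget] at hw; exact Option.some_inj.mp hw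
            simp [Function.comp, pvF, hpt', hp2]
          · simp [Function.comp, pvF, hpt]
      · -- fresh target: both append a new entry
        have hcf : g.contains (pvCanonKey kv.1 cvD) = false := by
          cases hcg : g.contains (pvCanonKey kv.1 cvD) with
          | false => rfl
          | true => exact absurd hcg hc
        have hcfA : mA.contains (pvCanonKey kv.1 cvD) = false := hcont.trans hcf
        have hstepA : pvStepA dataD cvD mA kv = mA.insert (pvCanonKey kv.1 cvD)
            (pvDF (dataD.getD (pvCanonKey kv.1 cvD) [] ++ kv.2)) := by
          unfold pvStepA
          rw [if_neg hu]
          simp only [hcfA, Bool.not_false, if_true, pvInitLoop, PySem.Dict.getD_insert_self,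
            PySem.Set.update_nil_left, PySem.Set.empty]
          rw [pvMergeA, PySem.Dict.insert_insert_self]
          show mA.insert _ (pvDF (pvDF (dataD.getD (pvCanonKey kv.1 cvD) []) ++ kv.2)) = _
          rw [pvDF_idem]
        have hstepB : pvStepB cvD g kv = g.insert (pvCanonKey kv.1 cvD) kv.2 := by
          unfold pvStepB
          rw [if_neg hu]
          show g.insert (pvCanonKey kv.1 cvD) (g.getD (pvCanonKey kv.1 cvD) [] ++ kv.2) = _
          rw [PySem.Dict.getD_of_not_contains g [] hcf, List.nil_append]
        rw [hstepA, hstepB]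
        apply ih
        · exact PySem.Dict.nodup_keys_insert _ _ _ hnd
        · rw [PySem.Dict.items_insert_of_not_contains mA _ hcfA,
            PySem.Dict.items_insert_of_not_contains g _ hcf, List.map_append, h]
          rfl

theorem pvPhase2 (dataD : PySem.Dict String (List String)) (l : List (String × List String))
    (hnd : (l.map Prod.fst).Nodup) :
    (l.foldl (fun (m : PySem.Dict String (List String)) p =>
        let ms := (dataD.getD p.1 [] ++ p.2).foldl
          (fun (q : List String × PySem.Set String) tag =>
            if pvKeep tag && !(PySem.Set.contains q.2 tag) then (q.1 ++ [tag], PySem.Set.add q.2 tag) else q)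
          ([], PySem.Set.empty)
        m.insert p.1 ms.1) PySem.Dict.empty).items = l.map (pvF dataD) := by
  rw [PySem.Dict.items_foldl_insert_fresh (k := Prod.fst)
    (v := fun p => ((dataD.getD p.1 [] ++ p.2).foldl
      (fun (q : List String × PySem.Set String) tag =>
        if pvKeep tag && !(PySem.Set.contains q.2 tag) then (q.1 ++ [tag], PySem.Set.add q.2 tag) else q)
      ([], PySem.Set.empty)).1)
    (d := PySem.Dict.empty) (l := l) (by intro a _; exact PySem.Dict.contains_empty _) hnd]
  rw [show (PySem.Dict.empty : PySem.Dict String (List String)).items = [] from rfl, List.nil_append]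
  apply List.map_congr_left
  intro p _
  have hm := pvMergeB (dataD.getD p.1 [] ++ p.2) PySem.Set.empty
  simp only [PySem.Set.empty] at hm ⊢
  rw [hm]
  simp [pvF, pvDF, PySem.Set.update_nil_left]

theorem migrate_url_key_dict_spec : Claim_equal_migrate_url_key_dict := by
  intro data cv _
  show (List.foldl (pvStepA (PySem.Dict.mk data) (PySem.Dict.mk cv)) PySem.Dict.empty data).items
    = migrate_url_key_dict_alt data cv
  have h1 := pvInv (PySem.Dict.mk data) (PySem.Dict.mk cv) data PySem.Dict.empty PySem.Dict.empty
    (by exact List.nodup_nil) rfl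
  rw [h1]
  have hnd : ((List.foldl (pvStepB (PySem.Dict.mk cv)) PySem.Dict.empty data).items.map Prod.fst).Nodup :=
    pvNodupB (PySem.Dict.mk cv) data PySem.Dict.empty (by exact List.nodup_nil)
  have h2 := pvPhase2 (PySem.Dict.mk data)
    (List.foldl (pvStepB (PySem.Dict.mk cv)) PySem.Dict.empty data).items hnd
  exact h2.symm
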